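-- pv_equiv track=rewrite | github.com/raionsakana-tul-computer-science/ppkwu | zadanie_2/flask_app.py | count_small_letters
-- ===== SOURCE A (Python) =====
-- def count_small_letters(text: str):
--     index, mark = 0, False
--     temp_letters = [0]
--
--     for c in text:
--         if c.islower():
--             temp_letters[index] = temp_letters[index] + 1
--             mark = True
--         else:
--             mark = False
--
--         if not mark:
--             index += 1
--             temp_letters.append(0)
--
--     letters = [c for c in temp_letters if c != 0]
--     return sum(letters), len(letters), letters
-- ===== SOURCE B (Python) =====
-- def count_small_letters(text: str):
--     # Two-pointer scan: jump over each maximal lowercase run directly,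
--     # instead of A's mark/index state machine with a zero-padded list and a filter pass.
--     runs = []
--     i, n = 0, len(text)
--     while i < n:
--         if text[i].islower():
--             j = i + 1
--             while j < n and text[j].islower():
--                 j += 1
--             runs.append(j - i)
--             i = j
--         else:
--             i += 1
--     return sum(runs), len(runs), runs
-- ===== Notes on version B (the rewrite author's own statement) =====
-- stated objective: alternative
-- what changed: Replaces A's mark/index state machine (zero-padded accumulator list plus a final zero-filter pass) with a two-pointer scan that jumps over each maximal lowercase run and appends its length directly.
import Mathlib
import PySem

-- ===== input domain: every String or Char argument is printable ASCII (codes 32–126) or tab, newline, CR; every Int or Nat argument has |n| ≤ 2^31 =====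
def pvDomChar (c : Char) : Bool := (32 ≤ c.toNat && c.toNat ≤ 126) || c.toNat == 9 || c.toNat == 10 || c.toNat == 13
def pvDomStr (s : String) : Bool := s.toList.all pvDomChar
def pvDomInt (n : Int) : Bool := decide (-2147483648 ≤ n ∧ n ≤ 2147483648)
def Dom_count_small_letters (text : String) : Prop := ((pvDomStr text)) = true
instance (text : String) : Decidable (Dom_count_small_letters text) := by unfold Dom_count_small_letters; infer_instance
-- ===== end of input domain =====

-- B replaces A's mark/index state machine (zero-padded list + filter pass) with a
-- two-pointer scan over maximal lowercase runs; same cost, different decomposition.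

-- ===== PORT A =====
-- one loop iteration of A; `temp.getD index 0`/`List.set` port `temp_letters[index]` —
-- the index is always in range here (A maintains index = len(temp_letters) - 1), so this is exact
def pvStepA (s : Nat × Bool × List Int) (c : Char) : Nat × Bool × List Int :=
  let index := s.1
  let temp := s.2.2
  let (mark, temp) :=
    if PySem.Chars.islower c then (true, temp.set index (temp.getD index 0 + 1))
    else (false, temp)
  if mark then (index, mark, temp) else (index + 1, mark, temp ++ [0])

def count_small_letters (text : String) : Int × Int × List Int :=
  let st := text.toList.foldl pvStepA (0, false, [0])
  let letters := st.2.2.filter (fun c => c != 0)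
  (letters.sum, (letters.length : Int), letters)

-- ===== PORT B =====
-- the outer while-loop of Source B: the inner `while j < n and text[j].islower()` advance
-- is the takeWhile/dropWhile split of the remaining suffix (j - i = 1 + run after text[i])
def pvAltRuns : List Char → List Int
  | [] => []
  | c :: cs =>
    if PySem.Chars.islower c then
      ((cs.takeWhile PySem.Chars.islower).length + 1 : Int) ::
        pvAltRuns (cs.dropWhile PySem.Chars.islower)
    else pvAltRuns cs
termination_by l => l.length
decreasing_by
  · exact Nat.lt_succ_of_le (List.length_dropWhile_le _ _)
  · simp

def count_small_letters_alt (text : String) : Int × Int × List Int :=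
  let runs := pvAltRuns text.toList
  (runs.sum, (runs.length : Int), runs)

-- ===== PRECONDITION & SPEC =====
def Spec_count_small_letters (text : String) (out : Int × Int × List Int) : Prop := out = count_small_letters_alt text
instance (text : String) (out : Int × Int × List Int) : Decidable (Spec_count_small_letters text out) := by unfold Spec_count_small_letters; infer_instance

-- ===== CLAIM (what is proved, stated in full; the proofs are below) =====
def Claim_equal_count_small_letters : Prop := ∀ (text : String), Dom_count_small_letters text → Spec_count_small_letters text (count_small_letters text)

-- ===== LEMMAS AND PROOFS =====

-- the final temp_letters list A builds, as a direct recursion: `cur` is the entry being grown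
def pvF (cur : Int) : List Char → List Int
  | [] => [cur]
  | c :: cs => if PySem.Chars.islower c then pvF (cur + 1) cs else cur :: pvF 0 cs

theorem pv_getD_last (done : List Int) (cur : Int) :
    (done ++ [cur]).getD done.length 0 = cur := by
  induction done with
  | nil => simp
  | cons d ds ih => simpa using ih

theorem pv_set_last (done : List Int) (cur v : Int) :
    (done ++ [cur]).set done.length v = done ++ [v] := by
  induction done with
  | nil => simp
  | cons d ds ih => simpa using ih

theorem pv_foldA (cs : List Char) : ∀ (done : List Int) (cur : Int) (mark : Bool),
    (cs.foldl pvStepA (done.length, mark, done ++ [cur])).2.2 = done ++ pvF cur cs := by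
  induction cs with
  | nil => intro done cur mark; simp [pvF]
  | cons c cs ih =>
    intro done cur mark
    by_cases h : PySem.Chars.islower c
    · simp only [List.foldl_cons, pvStepA, h, if_true, pv_getD_last, pv_set_last, pvF]
      exact ih done (cur + 1) true
    · simp only [List.foldl_cons, pvStepA, h, if_false, Bool.false_eq_true, pvF]
      have := ih (done ++ [cur]) 0 false
      simp only [List.length_append, List.length_cons, List.length_nil, Nat.zero_add,
        List.append_assoc, List.singleton_append] at this ⊢
      exact this

theorem pv_filterF (cs : List Char) :
    ((pvF 0 cs).filter (fun c => c != 0) = pvAltRuns cs) ∧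
    (∀ cur : Int, 0 < cur → (pvF cur cs).filter (fun c => c != 0) =
      (((cs.takeWhile PySem.Chars.islower).length : Int) + cur) ::
        pvAltRuns (cs.dropWhile PySem.Chars.islower)) := by
  induction cs with
  | nil =>
    refine ⟨by simp [pvF, pvAltRuns], fun cur hcur => ?_⟩
    have hne : (cur != 0) = true := by simpa using hcur.ne'
    simp [pvF, pvAltRuns, hne]
  | cons c cs ih =>
    obtain ⟨iha, ihb⟩ := ih
    by_cases h : PySem.Chars.islower c
    · constructor
      · have h1 := ihb 1 (by omega)
        simp only [pvF, h, if_true, List.takeWhile_cons_of_pos h,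
          List.dropWhile_cons_of_pos h, pvAltRuns]
        rw [show (0 : Int) + 1 = 1 from rfl, h1]
      · intro cur hcur
        have h1 := ihb (cur + 1) (by omega)
        simp only [pvF, h, if_true, List.takeWhile_cons_of_pos h,
          List.dropWhile_cons_of_pos h, List.length_cons, pvAltRuns]
        rw [h1]; congr 1; push_cast; ring
    · constructor
      · simp [pvF, h, pvAltRuns, iha]
      · intro cur hcur
        have hne : (cur != 0) = true := by simpa using hcur.ne'
        simp [pvF, h, pvAltRuns, List.takeWhile_cons_of_neg h,
          List.dropWhile_cons_of_neg h, hne, iha]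

-- ===== VERDICT (by name: the statement is the Claim_ definition above) =====
theorem count_small_letters_spec : Claim_equal_count_small_letters := by
  intro text _
  unfold Spec_count_small_letters count_small_letters count_small_letters_alt
  have h0 : (text.toList.foldl pvStepA (0, false, [0])).2.2 = pvF 0 text.toList := by
    have := pv_foldA text.toList [] 0 false
    simpa using this
  simp only [h0, (pv_filterF text.toList).1]
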